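-- pv_equiv track=rewrite | github.com/mdeeds/hardwired-design | scripts/wc_analysis.py | preprocess_netlist
-- ===== SOURCE A (Python) =====
-- def preprocess_netlist(raw: str) -> list[tuple[str, list[int]]]:
--     """Join continuation lines and strip comments.
--
--     Returns a list of (logical_line, [original_line_indices]).
--     Line indices are 0-based into the raw text split.
--     """
--     raw_lines = raw.split("\n")
--     logical: list[tuple[str, list[int]]] = []
--
--     for i, line in enumerate(raw_lines):
--         stripped = line.strip()
--
--         # Skip blank lines
--         if not stripped:
--             continue
--
--         # Skip comments
--         if stripped.startswith("*"):
--             continue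
--
--         # Continuation line — append to previous logical line
--         if stripped.startswith("+"):
--             if logical:
--                 prev_text, prev_indices = logical[-1]
--                 logical[-1] = (prev_text + " " + stripped[1:].strip(), prev_indices + [i])
--             continue
--
--         # New logical line
--         logical.append((stripped, [i]))
--
--     return logical
-- ===== SOURCE B (Python) =====
-- def preprocess_netlist(raw: str) -> list[tuple[str, list[int]]]:
--     """Join continuation lines and strip comments.
--
--     Single pass with a pending-line accumulator: the currently open logical
--     line is kept as a list of fragments (parts) plus its source indices
--     (idxs) and joined with single spaces when the next logical line starts
--     (or at end of input), instead of rebuilding logical[-1] by string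
--     concatenation for every continuation line.
--     """
--     out: list[tuple[str, list[int]]] = []
--     parts: list[str] = []
--     idxs: list[int] = []
--     for i, line in enumerate(raw.split("\n")):
--         s = line.strip()
--         if not s or s.startswith("*"):
--             continue
--         if s.startswith("+"):
--             if parts:
--                 parts.append(s[1:].strip())
--                 idxs.append(i)
--         else:
--             if parts:
--                 out.append((" ".join(parts), idxs))
--             parts = [s]
--             idxs = [i]
--     if parts:
--         out.append((" ".join(parts), idxs))
--     return out
-- ===== Notes on version B (the rewrite author's own statement) =====
-- stated objective: alternative
-- what changed: B threads a pending-fragments accumulator (parts, idxs) and flushes each logical line with one space-join when the next one starts, instead of A's rebuilding of logical[-1] by string concatenation for every continuation line.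
import Mathlib
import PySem

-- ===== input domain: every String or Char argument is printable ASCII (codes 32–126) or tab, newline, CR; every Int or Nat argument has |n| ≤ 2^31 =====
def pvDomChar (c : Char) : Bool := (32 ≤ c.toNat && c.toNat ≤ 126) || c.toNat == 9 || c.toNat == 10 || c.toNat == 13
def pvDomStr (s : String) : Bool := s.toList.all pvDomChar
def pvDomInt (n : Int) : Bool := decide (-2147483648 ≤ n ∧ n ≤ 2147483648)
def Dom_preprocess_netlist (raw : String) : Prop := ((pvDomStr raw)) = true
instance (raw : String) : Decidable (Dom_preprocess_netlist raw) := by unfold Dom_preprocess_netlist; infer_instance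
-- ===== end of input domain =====

-- B replaces A's in-place rebuilding of logical[-1] (string concat per continuation line)
-- by a pending-fragments accumulator flushed with one ' '.join per logical line (objective: alternative decomposition).

-- ===== PORT A =====
-- one iteration of A's for-loop; state = logical, p = (i, line)
def pvStepA (logical : List (String × List Int)) (p : Int × String) : List (String × List Int) :=
  let stripped := PySem.Str.strip p.2
  if PySem.Str.len stripped == 0 then logical            -- if not stripped: continue
  else if PySem.Str.startswith stripped "*" then logical -- comment
  else if PySem.Str.startswith stripped "+" then         -- continuation
    match logical.getLast? with                          -- if logical: … logical[-1] = …
    | none => logical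
    | some (prev_text, prev_indices) =>
        logical.dropLast ++
          [(PySem.Str.join "" [prev_text, " ", PySem.Str.strip (PySem.Str.slice stripped (some 1) none)],
            prev_indices ++ [p.1])]
  else logical ++ [(stripped, [p.1])]                    -- new logical line

def preprocess_netlist (raw : String) : List (String × List Int) :=
  (PySem.List.enumerate ((PySem.Str.split? raw "\n").getD []) 0).foldl pvStepA []

-- ===== PORT B =====
-- Source B's repeated 'if parts: out.append((" ".join(parts), idxs))' flush code
def pvFlush (parts : List String) (idxs : List Int) : List (String × List Int) :=
  if parts.isEmpty then [] else [(PySem.Str.join " " parts, idxs)]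

-- one iteration of B's for-loop; state = (out, parts, idxs)
def pvStepB (st : List (String × List Int) × List String × List Int) (p : Int × String) :
    List (String × List Int) × List String × List Int :=
  let s := PySem.Str.strip p.2
  if PySem.Str.len s == 0 || PySem.Str.startswith s "*" then st
  else if PySem.Str.startswith s "+" then
    if st.2.1.isEmpty then st
    else (st.1, st.2.1 ++ [PySem.Str.strip (PySem.Str.slice s (some 1) none)], st.2.2 ++ [p.1])
  else (st.1 ++ pvFlush st.2.1 st.2.2, [s], [p.1])

def preprocess_netlist_alt (raw : String) : List (String × List Int) :=
  let st := (PySem.List.enumerate ((PySem.Str.split? raw "\n").getD []) 0).foldl pvStepB ([], [], [])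
  st.1 ++ pvFlush st.2.1 st.2.2

-- ===== PRECONDITION & SPEC =====
def Spec_preprocess_netlist (raw : String) (out : List (String × List Int)) : Prop := out = preprocess_netlist_alt raw
instance (raw : String) (out : List (String × List Int)) : Decidable (Spec_preprocess_netlist raw out) := by unfold Spec_preprocess_netlist; infer_instance

-- ===== CLAIM (what is proved, stated in full; the proofs are below) =====
def Claim_equal_preprocess_netlist : Prop := ∀ (raw : String), Dom_preprocess_netlist raw → Spec_preprocess_netlist raw (preprocess_netlist raw)

-- ===== LEMMAS AND PROOFS =====

lemma pv_chars_join_snoc (sp : List Char) (ps : List (List Char)) (x : List Char) (h : ps ≠ []) :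
    PySem.Chars.join sp (ps ++ [x]) = PySem.Chars.join sp ps ++ sp ++ x := by
  induction ps with
  | nil => exact absurd rfl h
  | cons p rest ih =>
    cases rest with
    | nil => simp [PySem.Chars.join_cons_cons, PySem.Chars.join_singleton]
    | cons q rest' =>
      have := ih (by simp)
      simp only [List.cons_append, PySem.Chars.join_cons_cons] at *
      simp [this, List.append_assoc]

lemma pv_join_snoc (parts : List String) (x : String) (h : parts ≠ []) :
    PySem.Str.join " " (parts ++ [x]) = PySem.Str.join "" [PySem.Str.join " " parts, " ", x] := by
  simp only [PySem.Str.join, List.map_append, List.map_cons, List.map_nil]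
  rw [pv_chars_join_snoc _ _ _ (by simpa using h)]
  simp [PySem.Chars.join_cons_cons, PySem.Chars.join_singleton]

lemma pv_join_singleton (s : String) : PySem.Str.join " " [s] = s := by
  simp [PySem.Str.join, PySem.Chars.join_singleton]

-- the loop invariant: A's logical list is B's flushed-so-far output plus the open line,
-- and an empty open line means nothing has been flushed yet
lemma pv_inv (l : List (Int × String)) :
    ∀ (out : List (String × List Int)) (parts : List String) (idxs : List Int),
      (parts = [] → out = []) →
      l.foldl pvStepA (out ++ pvFlush parts idxs) =
        ((l.foldl pvStepB (out, parts, idxs)).1 ++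
          pvFlush (l.foldl pvStepB (out, parts, idxs)).2.1 (l.foldl pvStepB (out, parts, idxs)).2.2) := by
  induction l with
  | nil => intro out parts idxs _; simp
  | cons p l ih =>
    intro out parts idxs hpe
    simp only [List.foldl_cons]
    by_cases h0 : PySem.Chars.strip p.2.toList = []
    · rw [show pvStepA (out ++ pvFlush parts idxs) p = out ++ pvFlush parts idxs by
        simp [pvStepA, h0],
        show pvStepB (out, parts, idxs) p = (out, parts, idxs) by simp [pvStepB, h0]]
      exact ih out parts idxs hpe
    · cases hstar : PySem.Chars.startswith (PySem.Chars.strip p.2.toList) ['*'] with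
      | true =>
        rw [show pvStepA (out ++ pvFlush parts idxs) p = out ++ pvFlush parts idxs by
          simp [pvStepA, h0, hstar],
          show pvStepB (out, parts, idxs) p = (out, parts, idxs) by simp [pvStepB, hstar]]
        exact ih out parts idxs hpe
      | false =>
        cases hplus : PySem.Chars.startswith (PySem.Chars.strip p.2.toList) ['+'] with
        | true =>
          cases hp : parts with
          | nil =>
            have hout : out = [] := hpe hp
            subst hp hout
            rw [show pvStepA (([] : List (String × List Int)) ++ pvFlush [] idxs) p
                  = [] ++ pvFlush [] idxs by simp [pvStepA, pvFlush, h0, hstar, hplus],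
              show pvStepB (([] : List (String × List Int)), ([] : List String), idxs) p
                  = ([], [], idxs) by simp [pvStepB, h0, hstar, hplus]]
            exact ih [] [] idxs (fun _ => rfl)
          | cons q qs =>
            have hx := pv_join_snoc (q :: qs)
              (PySem.Str.strip (PySem.Str.slice (PySem.Str.strip p.2) (some 1) none)) (by simp)
            have hA : pvStepA (out ++ pvFlush (q :: qs) idxs) p =
                out ++ pvFlush ((q :: qs) ++ [PySem.Str.strip (PySem.Str.slice (PySem.Str.strip p.2) (some 1) none)])
                  (idxs ++ [p.1]) := by
              simp [pvStepA, pvFlush, h0, hstar, hplus]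
              exact hx.symm
            have hB : pvStepB (out, q :: qs, idxs) p =
                (out, (q :: qs) ++ [PySem.Str.strip (PySem.Str.slice (PySem.Str.strip p.2) (some 1) none)],
                  idxs ++ [p.1]) := by
              simp [pvStepB, h0, hstar, hplus]
            rw [hA, hB]
            exact ih out _ _ (by simp)
        | false =>
          have hA : pvStepA (out ++ pvFlush parts idxs) p =
              (out ++ pvFlush parts idxs) ++ [(PySem.Str.strip p.2, [p.1])] := by
            simp [pvStepA, h0, hstar, hplus]
          have hB : pvStepB (out, parts, idxs) p =
              (out ++ pvFlush parts idxs, [PySem.Str.strip p.2], [p.1]) := by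
            simp [pvStepB, pvFlush, h0, hstar, hplus]
          rw [hA, hB]
          have := ih (out ++ pvFlush parts idxs) [PySem.Str.strip p.2] [p.1] (by simp)
          simpa [pvFlush, pv_join_singleton] using this

-- ===== VERDICT (by name: the statement is the Claim_ definition above) =====
theorem preprocess_netlist_spec : Claim_equal_preprocess_netlist := by
  intro raw _
  unfold Spec_preprocess_netlist preprocess_netlist preprocess_netlist_alt
  have := pv_inv (PySem.List.enumerate ((PySem.Str.split? raw "\n").getD []) 0) [] [] [] (fun _ => rfl)
  simpa [pvFlush] using this
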